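-- pv_equiv track=rewrite | github.com/Mauro-CVO/Python_Programs | Python_POO/Conteo abstracto de operacion.py | f
-- ===== SOURCE A (Python) =====
-- def f(x):
--
--     ans = 0
--
--     for i in range (1000):  # correra 1000 veces
--         ans += 1
--
--     for i in range(x):  # se le suma 1
--         ans += 1
--
--     for i in range(x):     #se le suma x y
--         for j in range(x): # se multiplica por otra x
--             ans += 1       # xomo son dos operaciones en total 2x^2
--             ans += 1
--
--     return ans # en total 1000+x+2x^2
-- ===== SOURCE B (Python) =====
-- def f(x):
--     # closed form: the loops add 1000, then x, then 2*x^2 (loops run 0 times for x<=0)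
--     m = max(x, 0)
--     return 1000 + m + 2 * m * m
-- ===== Notes on version B (the rewrite author's own statement) =====
-- stated objective: faster
-- what changed: replaced the counting loops (including the nested x-by-x loop) with the closed-form expression 1000 + m + 2*m*m where m = max(x, 0)
import Mathlib
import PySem

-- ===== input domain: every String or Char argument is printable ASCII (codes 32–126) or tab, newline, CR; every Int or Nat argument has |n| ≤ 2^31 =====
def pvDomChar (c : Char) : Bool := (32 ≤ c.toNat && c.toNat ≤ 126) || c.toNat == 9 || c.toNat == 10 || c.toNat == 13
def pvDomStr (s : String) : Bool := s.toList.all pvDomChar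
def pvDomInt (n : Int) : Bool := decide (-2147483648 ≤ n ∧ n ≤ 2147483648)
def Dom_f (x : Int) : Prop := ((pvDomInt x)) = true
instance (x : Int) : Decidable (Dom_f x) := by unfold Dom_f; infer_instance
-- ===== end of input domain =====

-- B replaces A's counting loops by the closed form 1000 + m + 2*m*m, m = max(x,0): O(1) instead of O(x^2).

-- ===== PORT A =====
def f (x : Int) : Int :=
  let ans : Int := 0
  let ans := (PySem.List.pyRange 0 1000 1).foldl (fun a _ => a + 1) ans
  let ans := (PySem.List.pyRange 0 x 1).foldl (fun a _ => a + 1) ans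
  let ans := (PySem.List.pyRange 0 x 1).foldl
    (fun a _ => (PySem.List.pyRange 0 x 1).foldl (fun b _ => b + 1 + 1) a) ans
  ans

-- ===== PORT B =====
def f_alt (x : Int) : Int :=
  let m := max x 0
  1000 + m + 2 * m * m

-- ===== PRECONDITION & SPEC =====
def Spec_f (x : Int) (out : Int) : Prop := out = f_alt x
instance (x : Int) (out : Int) : Decidable (Spec_f x out) := by unfold Spec_f; infer_instance

-- ===== CLAIM (what is proved, stated in full; the proofs are below) =====
def Claim_equal_f : Prop := ∀ (x : Int), Dom_f x → Spec_f x (f x)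

-- ===== LEMMAS AND PROOFS =====

theorem pv_foldl_addc (c : Int) (l : List Int) (init : Int) :
    l.foldl (fun a _ => a + c) init = init + c * l.length := by
  induction l generalizing init with
  | nil => simp
  | cons h t ih => simp [List.foldl, ih]; ring

theorem pv_foldl_add1 (l : List Int) (init : Int) :
    l.foldl (fun a _ => a + 1) init = init + l.length := by
  simpa using pv_foldl_addc 1 l init

theorem pv_foldl_add2 (l : List Int) (init : Int) :
    l.foldl (fun b _ => b + 1 + 1) init = init + 2 * l.length := by
  have h : (fun (b : Int) (_ : Int) => b + 1 + 1) = fun b _ => b + 2 := by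
    funext b _; ring
  rw [h, pv_foldl_addc]

theorem pv_foldl_nested (m : List Int) (l : List Int) (init : Int) :
    l.foldl (fun a _ => m.foldl (fun b _ => b + 1 + 1) a) init
      = init + l.length * (2 * m.length) := by
  have h : (fun (a : Int) (_ : Int) => m.foldl (fun b _ => b + 1 + 1) a)
      = fun a _ => a + 2 * (m.length : Int) := by
    funext a _; rw [pv_foldl_add2]
  rw [h, pv_foldl_addc]; ring

theorem f_spec : Claim_equal_f := by
  intro x _
  unfold Spec_f f f_alt
  simp only [pv_foldl_add1, pv_foldl_nested, PySem.List.length_pyRange_one]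
  have h : ((x - 0).toNat : Int) = max x 0 := by omega
  rw [h]
  norm_num
  ring
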